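-- pv_equiv track=rewrite | github.com/fbosch/dotfiles | .config/opencode/scripts/gh-pr-normalize-feedback.py | strip_agent_noise
-- ===== SOURCE A (Python) =====
-- def strip_agent_noise(text):
--     if isinstance(text, str) is False:
--         return ""
--
--     lines = text.splitlines()
--     kept = []
--     skip = False
--
--     for line in lines:
--         lower = line.strip().lower()
--         if lower.startswith("### analysis") or lower.startswith("### tool output"):
--             skip = True
--             continue
--         if skip and lower.startswith("### "):
--             skip = False
--         if skip:
--             continue
--         kept.append(line)
--
--     cleaned = "\n".join(kept).strip()
--     return cleaned
-- ===== SOURCE B (Python) =====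
-- def strip_agent_noise(text):
--     if not isinstance(text, str):
--         return ""
--
--     def is_header(line):
--         return line.strip().lower().startswith("### ")
--
--     def is_noise(line):
--         low = line.strip().lower()
--         return low.startswith("### analysis") or low.startswith("### tool output")
--
--     lines = text.splitlines()
--     n = len(lines)
--     # leading group before the first header line is always kept
--     i = 0
--     kept = []
--     while i < n and not is_header(lines[i]):
--         kept.append(lines[i])
--         i += 1
--     # partition the rest into sections, each starting at a header line;
--     # keep a whole section unless its header is analysis/tool-output noise
--     while i < n:
--         j = i + 1
--         while j < n and not is_header(lines[j]):
--             j += 1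
--         if not is_noise(lines[i]):
--             kept.extend(lines[i:j])
--         i = j
--     return "\n".join(kept).strip()
-- ===== Notes on version B (the rewrite author's own statement) =====
-- stated objective: alternative
-- what changed: Replaced the running skip-flag loop by a partition-then-filter pass: split the lines into a leading group plus header-started sections and drop whole sections whose header marks agent noise, keeping the rest.
import Mathlib
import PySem

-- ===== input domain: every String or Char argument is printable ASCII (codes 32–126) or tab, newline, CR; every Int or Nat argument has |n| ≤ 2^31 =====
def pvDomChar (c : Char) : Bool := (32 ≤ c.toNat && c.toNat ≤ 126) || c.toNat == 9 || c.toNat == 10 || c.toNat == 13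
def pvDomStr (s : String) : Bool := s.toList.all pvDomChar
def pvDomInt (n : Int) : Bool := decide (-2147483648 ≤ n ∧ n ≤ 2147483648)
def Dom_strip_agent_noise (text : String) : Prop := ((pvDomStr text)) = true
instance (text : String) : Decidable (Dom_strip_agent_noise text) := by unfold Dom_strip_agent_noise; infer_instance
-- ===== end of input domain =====

-- B replaces A's running skip-flag loop by a partition-then-filter pass over header-started
-- sections (objective: alternative decomposition, same cost); return values proved equal.

-- ===== PORT A =====
-- one iteration of A's for-loop over (kept, skip)
def pvStepA (st : List String × Bool) (line : String) : List String × Bool :=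
  let kept := st.1
  let skip := st.2
  let lower := PySem.Str.lower (PySem.Str.strip line)
  if PySem.Str.startswith lower "### analysis" || PySem.Str.startswith lower "### tool output" then
    (kept, true)
  else
    let skip := if skip && PySem.Str.startswith lower "### " then false else skip
    if skip then (kept, skip) else (kept ++ [line], skip)

def strip_agent_noise (text : String) : String :=
  let lines := PySem.Str.splitlines text
  let st := lines.foldl pvStepA ([], false)
  PySem.Str.strip (PySem.Str.join "\n" st.1)

-- ===== PORT B =====
def pvIsHeader (line : String) : Bool :=
  PySem.Str.startswith (PySem.Str.lower (PySem.Str.strip line)) "### "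

def pvIsNoise (line : String) : Bool :=
  let low := PySem.Str.lower (PySem.Str.strip line)
  PySem.Str.startswith low "### analysis" || PySem.Str.startswith low "### tool output"

-- sections of the post-lead lines: each starts at a header; drop a section iff its header is noise
def pvKeepSections : List String → List String
  | [] => []
  | h :: rest =>
      let body := rest.takeWhile (fun l => !pvIsHeader l)
      let rest' := rest.dropWhile (fun l => !pvIsHeader l)
      (if pvIsNoise h then [] else h :: body) ++ pvKeepSections rest'
  termination_by ls => ls.length
  decreasing_by
    have := List.length_dropWhile_le (fun l => !pvIsHeader l) rest
    simp; omega

def strip_agent_noise_alt (text : String) : String :=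
  let lines := PySem.Str.splitlines text
  let lead := lines.takeWhile (fun l => !pvIsHeader l)
  let rest := lines.dropWhile (fun l => !pvIsHeader l)
  PySem.Str.strip (PySem.Str.join "\n" (lead ++ pvKeepSections rest))

-- ===== PRECONDITION & SPEC =====
def Spec_strip_agent_noise (text : String) (out : String) : Prop := out = strip_agent_noise_alt text
instance (text : String) (out : String) : Decidable (Spec_strip_agent_noise text out) := by unfold Spec_strip_agent_noise; infer_instance

-- ===== CLAIM (what is proved, stated in full; the proofs are below) =====
def Claim_equal_strip_agent_noise : Prop := ∀ (text : String), Dom_strip_agent_noise text → Spec_strip_agent_noise text (strip_agent_noise text)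

-- ===== LEMMAS AND PROOFS =====
-- A's loop, as structural recursion on the remaining lines
def pvALoop (skip : Bool) : List String → List String
  | [] => []
  | l :: ls =>
    if pvIsNoise l then pvALoop true ls
    else
      let skip' := if skip && pvIsHeader l then false else skip
      if skip' then pvALoop skip' ls else l :: pvALoop skip' ls

lemma pv_foldA (ls : List String) : ∀ (acc : List String) (skip : Bool),
    (ls.foldl pvStepA (acc, skip)).1 = acc ++ pvALoop skip ls := by
  induction ls with
  | nil => intro acc skip; simp [pvALoop]
  | cons l ls ih =>
    intro acc skip
    rw [List.foldl_cons]
    by_cases hn : pvIsNoise l = true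
    · have hn' : (PySem.Str.startswith (PySem.Str.lower (PySem.Str.strip l)) "### analysis"
        || PySem.Str.startswith (PySem.Str.lower (PySem.Str.strip l)) "### tool output") = true := by
        simpa [pvIsNoise] using hn
      simp at hn'
      simp [pvStepA, hn', pvALoop, hn, ih]
    · have hn' : (PySem.Str.startswith (PySem.Str.lower (PySem.Str.strip l)) "### analysis"
        || PySem.Str.startswith (PySem.Str.lower (PySem.Str.strip l)) "### tool output") = false := by
        simpa [pvIsNoise] using hn
      simp at hn'
      cases skip <;>
          cases hh : PySem.Str.startswith (PySem.Str.lower (PySem.Str.strip l)) "### " <;>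
        all_goals
          (simp at hh;
           simp [pvStepA, hn', hh, pvALoop, hn, pvIsHeader, ih])

lemma pv_noise_header (l : String) (h : pvIsNoise l = true) : pvIsHeader l = true := by
  unfold pvIsNoise at h
  unfold pvIsHeader
  simp only [Bool.or_eq_true] at h
  rcases h with h | h <;>
  · simp only [PySem.Str.startswith_eq, PySem.Chars.startswith_iff] at h ⊢
    exact List.IsPrefix.trans (by decide) h

lemma pv_key (ls : List String) :
    pvALoop true ls = pvKeepSections (ls.dropWhile (fun l => !pvIsHeader l)) ∧
    pvALoop false ls = ls.takeWhile (fun l => !pvIsHeader l)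
      ++ pvKeepSections (ls.dropWhile (fun l => !pvIsHeader l)) := by
  induction ls with
  | nil => simp [pvALoop, pvKeepSections]
  | cons l ls ih =>
    by_cases hh : pvIsHeader l = true
    · have hd : (l :: ls).dropWhile (fun l => !pvIsHeader l) = l :: ls := by
        simp [hh]
      have ht : (l :: ls).takeWhile (fun l => !pvIsHeader l) = [] := by
        simp [hh]
      by_cases hn : pvIsNoise l = true
      · constructor <;>
        · rw [hd]
          simp [pvALoop, hn, pvKeepSections, ih.1, ht]
      · constructor <;>
        · rw [hd]
          simp [pvALoop, hn, hh, pvKeepSections, ih.2, ht]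
    · have hn : pvIsNoise l = false := by
        by_contra h
        simp only [Bool.not_eq_false] at h
        exact hh (pv_noise_header l h)
      have hh' : pvIsHeader l = false := by simpa using hh
      constructor
      · simp [pvALoop, hn, hh', ih.1]
      · simp [pvALoop, hn, hh', ih.2]

-- ===== VERDICT (by name: the statement is the Claim_ definition above) =====
theorem strip_agent_noise_spec : Claim_equal_strip_agent_noise := by
  intro text _
  unfold Spec_strip_agent_noise strip_agent_noise strip_agent_noise_alt
  simp only []
  rw [pv_foldA, List.nil_append, (pv_key (PySem.Str.splitlines text)).2]
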